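-- pv_equiv track=rewrite | github.com/praveen-solanki/RAG | PDF_Chunk_Inspector.py | build_page_section_map
-- ===== SOURCE A (Python) =====
-- from typing import Optional, List, Dict, Tuple, Set
--
-- def build_page_section_map(
--     bookmarks: List[Tuple[str, int, int]],
--     total_pages: int,
-- ) -> Dict[int, List[Tuple[str, int]]]:
--     """
--     For each page number (1-based) build a list of bookmark entries whose
--     *start* page equals that page.  Used by SmartSectionDetector to inject
--     heading lines at the right position in the text stream.
--
--     Returns: {page_num: [(title, level), ...]}
--     """
--     page_map: Dict[int, List[Tuple[str, int]]] = {}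
--     for title, page_num, level in bookmarks:
--         page_map.setdefault(page_num, []).append((title, level))
--     return page_map
-- ===== SOURCE B (Python) =====
-- def build_page_section_map(bookmarks, total_pages):
--     """Two-pass: collect distinct start pages in first-seen order, then
--     build each page's entry list by a filtering comprehension."""
--     pages = []
--     for _, page_num, _ in bookmarks:
--         if page_num not in pages:
--             pages.append(page_num)
--     return {p: [(title, level) for title, q, level in bookmarks if q == p]
--             for p in pages}
-- ===== Notes on version B (the rewrite author's own statement) =====
-- stated objective: alternative
-- what changed: Replaces the single-pass setdefault hash-accumulation with a two-pass strategy: first collect the distinct start pages in first-seen order, then build each page's list with a filtering comprehension over the bookmarks.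
import Mathlib
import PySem

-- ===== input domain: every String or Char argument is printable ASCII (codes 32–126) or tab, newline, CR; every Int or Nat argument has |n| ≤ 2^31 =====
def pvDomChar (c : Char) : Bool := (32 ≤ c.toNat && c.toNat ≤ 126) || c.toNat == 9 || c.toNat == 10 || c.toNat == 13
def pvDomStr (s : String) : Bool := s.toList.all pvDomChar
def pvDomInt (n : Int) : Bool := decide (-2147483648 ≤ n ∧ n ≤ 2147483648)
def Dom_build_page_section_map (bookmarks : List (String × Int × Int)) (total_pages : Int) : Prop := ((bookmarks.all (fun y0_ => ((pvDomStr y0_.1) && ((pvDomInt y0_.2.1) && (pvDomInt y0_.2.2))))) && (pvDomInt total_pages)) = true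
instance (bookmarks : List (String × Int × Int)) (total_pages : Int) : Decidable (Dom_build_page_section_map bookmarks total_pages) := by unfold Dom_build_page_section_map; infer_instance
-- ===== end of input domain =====

-- ===== PORT A =====
-- A builds the map in one pass: page_map.setdefault(page_num, []).append((title, level))
def build_page_section_map (bookmarks : List (String × Int × Int)) (total_pages : Int) : List (Int × List (String × Int)) :=
  (bookmarks.foldl (fun d b => d.modify b.2.1 ([] : List (String × Int)) (· ++ [(b.1, b.2.2)]))
    (PySem.Dict.empty : PySem.Dict Int (List (String × Int)))).items

-- ===== PORT B =====
-- B (alternative decomposition): collect distinct start pages first, then filter per page.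
def build_page_section_map_alt (bookmarks : List (String × Int × Int)) (total_pages : Int) : List (Int × List (String × Int)) :=
  let pages : PySem.Set Int :=
    bookmarks.foldl (fun acc b => if PySem.Set.contains acc b.2.1 then acc else acc ++ [b.2.1]) []
  pages.map (fun p => (p, (bookmarks.filter (fun b => b.2.1 == p)).map (fun b => (b.1, b.2.2))))

-- ===== PRECONDITION & SPEC =====
def Spec_build_page_section_map (bookmarks : List (String × Int × Int)) (total_pages : Int) (out : List (Int × List (String × Int))) : Prop := out = build_page_section_map_alt bookmarks total_pages
instance (bookmarks : List (String × Int × Int)) (total_pages : Int) (out : List (Int × List (String × Int))) : Decidable (Spec_build_page_section_map bookmarks total_pages out) := by unfold Spec_build_page_section_map; infer_instance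

-- ===== CLAIM (what is proved, stated in full; the proofs are below) =====
def Claim_equal_build_page_section_map : Prop := ∀ (bookmarks : List (String × Int × Int)) (total_pages : Int), Dom_build_page_section_map bookmarks total_pages → Spec_build_page_section_map bookmarks total_pages (build_page_section_map bookmarks total_pages)

-- ===== LEMMAS AND PROOFS =====

-- ===== VERDICT (by name: the statement is the Claim_ definition above) =====
theorem build_page_section_map_spec : Claim_equal_build_page_section_map := by
  intro bookmarks total_pages _
  unfold Spec_build_page_section_map build_page_section_map build_page_section_map_alt
  -- the dict A builds
  set d := bookmarks.foldl (fun d b => d.modify b.2.1 ([] : List (String × Int)) (· ++ [(b.1, b.2.2)]))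
    (PySem.Dict.empty : PySem.Dict Int (List (String × Int))) with hd
  -- its keys are the distinct start pages in first-seen order
  have hkeys : d.keys = PySem.Set.ofList (bookmarks.map (·.2.1)) := by
    have h := PySem.Dict.keys_foldl_modify_key (l := bookmarks)
      (key := fun (b : String × Int × Int) => b.2.1) (d0 := ([] : List (String × Int)))
      (f := fun (_ : PySem.Dict Int (List (String × Int))) (b : String × Int × Int) xs =>
        xs ++ [(b.1, b.2.2)])
      (d := PySem.Dict.empty)
    simpa [PySem.Set.update_nil_left] using h
  have hnd : d.keys.Nodup := by rw [hkeys]; exact PySem.Set.nodup_ofList _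
  -- each page's value is the filtered entry list
  have hget : ∀ c, d.getD c [] =
      (bookmarks.filter (fun b => b.2.1 == c)).map (fun b => (b.1, b.2.2)) := by
    intro c
    have hmap : d = (bookmarks.map (fun b => (b.2.1, (b.1, b.2.2)))).foldl
        (fun d p => d.modify p.1 ([] : List (String × Int)) (· ++ [p.2]))
        PySem.Dict.empty := by
      rw [hd, List.foldl_map]
    rw [hmap, PySem.Dict.getD_foldl_modify_append]
    simp [List.filter_map, List.map_map, Function.comp_def]
  -- B's first pass is Set.ofList of the pages
  have hpages : bookmarks.foldl
      (fun acc b => if PySem.Set.contains acc b.2.1 then acc else acc ++ [b.2.1])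
      ([] : PySem.Set Int) = PySem.Set.ofList (bookmarks.map (·.2.1)) := by
    have : bookmarks.foldl
        (fun acc b => if PySem.Set.contains acc b.2.1 then acc else acc ++ [b.2.1])
        ([] : PySem.Set Int)
        = bookmarks.foldl (fun acc b => PySem.Set.add acc b.2.1) ([] : PySem.Set Int) := rfl
    rw [this, ← PySem.Set.update_map_eq_foldl_add, PySem.Set.update_nil_left]
  rw [PySem.Dict.items_eq_map_keys d hnd [], hkeys, hpages]
  exact List.map_congr_left (fun p _ => by rw [hget p])
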